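-- pv_equiv track=rewrite | github.com/jackblk/CyberJutsu-JuniorCTFlag2021-Answers | first-round/crypto/xor-revenge.py | prepare_result
-- ===== SOURCE A (Python) =====
-- KEY_LENGTH = 32
--
-- def prepare_result(cipher_mess):
--     cipher_list = [cipher_mess[i : i + 2] for i in range(0, len(cipher_mess), 2)]
--     cipher_dict = {}
--     for index in range(KEY_LENGTH):
--         cipher_dict[index] = []
--     for index in range(len(cipher_list)):
--         cipher_dict[index % KEY_LENGTH].append(cipher_list[index])
--     return cipher_dict
-- ===== SOURCE B (Python) =====
-- KEY_LENGTH = 32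
--
-- def prepare_result(cipher_mess):
--     # gather per bucket with a strided slice instead of scattering chunks by index % 32
--     n = len(cipher_mess)
--     return {b: [cipher_mess[i : i + 2] for i in range(2 * b, n, 64)]
--             for b in range(KEY_LENGTH)}
-- ===== Notes on version B (the rewrite author's own statement) =====
-- stated objective: alternative
-- what changed: Scatter is flipped to gather: instead of building the full chunk list and appending each chunk to bucket index % 32 through a dict, B loops over the 32 bucket indices and builds each bucket directly from the string with a stride-64 range of start positions, skipping the intermediate chunk list and per-element dict updates.
import Mathlib
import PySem

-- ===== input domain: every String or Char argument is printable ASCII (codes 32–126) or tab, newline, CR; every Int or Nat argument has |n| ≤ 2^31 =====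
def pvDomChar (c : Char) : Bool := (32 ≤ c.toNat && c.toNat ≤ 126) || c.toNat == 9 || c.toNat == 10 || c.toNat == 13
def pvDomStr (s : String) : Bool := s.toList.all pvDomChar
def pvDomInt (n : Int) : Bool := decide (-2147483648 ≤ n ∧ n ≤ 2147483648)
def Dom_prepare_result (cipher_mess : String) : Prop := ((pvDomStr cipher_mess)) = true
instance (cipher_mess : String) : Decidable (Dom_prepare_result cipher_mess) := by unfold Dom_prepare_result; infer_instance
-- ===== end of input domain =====

-- B flips A's scatter (append each 2-char chunk to bucket index % 32) into a gather
-- (each of the 32 buckets is read off the string with a stride-64 range of start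
-- positions); objective: alternative decomposition, same cost.

-- ===== PORT A =====
def prepare_result (cipher_mess : String) : List (Int × List String) :=
  let cipher_list : List String :=
    (PySem.List.pyRange 0 (PySem.Str.len cipher_mess) 2).map
      (fun i => PySem.Str.slice cipher_mess (some i) (some (i + 2)))
  let cipher_dict : PySem.Dict Int (List String) :=
    (PySem.List.pyRange 0 32 1).foldl (fun d index => d.insert index []) PySem.Dict.empty
  let cipher_dict :=
    (PySem.List.pyRange 0 (cipher_list.length : Int) 1).foldl
      (fun d index =>
        d.modify (PySem.Int.mod index 32) []
          (fun lst => lst ++ [PySem.List.pyGetD cipher_list index ""])) cipher_dict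
  cipher_dict.items

-- ===== PORT B =====
def prepare_result_alt (cipher_mess : String) : List (Int × List String) :=
  let n : Int := PySem.Str.len cipher_mess
  (PySem.List.pyRange 0 32 1).map
    (fun b =>
      (b, (PySem.List.pyRange (2 * b) n 64).map
            (fun i => PySem.Str.slice cipher_mess (some i) (some (i + 2)))))

-- ===== PRECONDITION & SPEC =====
def Spec_prepare_result (cipher_mess : String) (out : List (Int × List String)) : Prop := out = prepare_result_alt cipher_mess
instance (cipher_mess : String) (out : List (Int × List String)) : Decidable (Spec_prepare_result cipher_mess out) := by unfold Spec_prepare_result; infer_instance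

-- ===== CLAIM (what is proved, stated in full; the proofs are below) =====
def Claim_equal_prepare_result : Prop := ∀ (cipher_mess : String), Dom_prepare_result cipher_mess → Spec_prepare_result cipher_mess (prepare_result cipher_mess)

-- ===== LEMMAS AND PROOFS =====

-- A's dictionary loop, characterised: the items are the 32 buckets in key order,
-- bucket b holding the second components of the pairs whose first component is b.
theorem scatter_items (l : List (Int × String))
    (hl : ∀ p ∈ l, 0 ≤ p.1 ∧ p.1 < 32) :
    (l.foldl (fun d p => d.modify p.1 [] (fun x => x ++ [p.2]))
      ((PySem.List.pyRange 0 32 1).foldl (fun d index => d.insert index []) PySem.Dict.empty)).items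
    = (PySem.List.pyRange 0 32 1).map
        (fun b => (b, (l.filter (fun p => p.1 == b)).map (fun p => p.2))) := by
  set d0 : PySem.Dict Int (List String) :=
    (PySem.List.pyRange 0 32 1).foldl (fun d index => d.insert index []) PySem.Dict.empty with hd0
  have hd0items : d0.items = (PySem.List.pyRange 0 32 1).map (fun b => (b, ([] : List String))) := by
    rw [hd0]
    rw [PySem.Dict.items_foldl_insert_fresh (PySem.List.pyRange 0 32 1) (fun a => a) (fun _ => []) PySem.Dict.empty
      (by intro a _; simp [PySem.Dict.contains_empty]) (by simpa using PySem.List.nodup_pyRange_one 0 32)]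
    rfl
  have hd0keys : d0.keys = PySem.List.pyRange 0 32 1 := by
    simp [PySem.Dict.keys, hd0items, List.map_map, Function.comp_def]
  set F := fun (d : PySem.Dict Int (List String)) (p : Int × String) =>
    d.modify p.1 [] (fun x : List String => x ++ [p.2]) with hF
  have hkeys : (l.foldl F d0).keys = PySem.List.pyRange 0 32 1 := by
    have := PySem.Dict.keys_foldl_modify_key l (fun p => p.1) [] (fun _ p => fun x => x ++ [p.2]) d0
    rw [hF]
    rw [this, hd0keys, PySem.Set.update_eq_append_filter]
    have : (PySem.List.pyRange 0 32 1 : List Int) ++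
        (PySem.Set.ofList (l.map (fun p => p.1))).filter
          (fun y => !(PySem.List.pyRange 0 32 1 : List Int).contains y)
        = PySem.List.pyRange 0 32 1 ++ [] := by
      congr 1
      rw [List.filter_eq_nil_iff]
      intro y hy
      have hy' : y ∈ l.map (fun p => p.1) := (PySem.Set.mem_ofList _ _).mp hy
      obtain ⟨p, hp, rfl⟩ := List.mem_map.mp hy'
      have := hl p hp
      simp only [Bool.not_eq_true', List.contains_eq_mem, decide_eq_false_iff_not]
      intro hcon
      exact hcon (PySem.List.mem_pyRange_one.mpr ⟨this.1, this.2⟩)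
    simpa using this
  have hnodup : (l.foldl F d0).keys.Nodup := by
    rw [hkeys]; exact PySem.List.nodup_pyRange_one 0 32
  rw [PySem.Dict.items_eq_map_keys _ hnodup ([] : List String), hkeys]
  apply List.map_congr_left
  intro b hb
  have hgetD : (l.foldl F d0).getD b [] =
      d0.getD b [] ++ (l.filter (fun p => p.1 == b)).map (fun p => p.2) := by
    rw [hF]
    exact PySem.Dict.getD_foldl_modify_append l d0 b
  have hd0getD : d0.getD b [] = [] := by
    have hmem : (b, ([] : List String)) ∈ d0.items := by
      rw [hd0items]; exact List.mem_map.mpr ⟨b, hb, rfl⟩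
    have hnd0 : d0.keys.Nodup := by rw [hd0keys]; exact PySem.List.nodup_pyRange_one 0 32
    exact PySem.Dict.getD_of_mem_items d0 hmem hnd0 []
  rw [hgetD, hd0getD]
  simp

-- number of k < M with k ≡ b (mod 32)
def cnt (M : Nat) (b : Int) : Nat := (((M : Int) - b + 31) / 32).toNat

theorem range_filter_mod (M : Nat) (b : Int) (hb0 : 0 ≤ b) (hb : b < 32) :
    (List.range M).filter (fun k : Nat => ((k : Int) % 32 == b))
    = (List.range (cnt M b)).map (fun t => b.toNat + 32 * t) := by
  induction M with
  | zero =>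
    have : cnt 0 b = 0 := by unfold cnt; omega
    simp [this]
  | succ M ih =>
    rw [List.range_succ, List.filter_append, ih]
    by_cases h : (M : Int) % 32 = b
    · have hc : cnt (M + 1) b = cnt M b + 1 := by unfold cnt; omega
      have hM : b.toNat + 32 * cnt M b = M := by unfold cnt; omega
      rw [hc, List.range_succ, List.map_append]
      simp [h, hM]
    · have hc : cnt (M + 1) b = cnt M b := by unfold cnt; omega
      rw [hc]
      simp [h]

-- the 2-char chunk of s starting at i, and the number of chunks
def chunkf (s : String) (i : Int) : String := PySem.Str.slice s (some i) (some (i + 2))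
def Mf (s : String) : Nat := ((PySem.Str.len s + 1) / 2).toNat

theorem len_nonneg (s : String) : 0 ≤ PySem.Str.len s := by
  rw [PySem.Str.len_eq]; positivity

theorem cl_eq (s : String) :
    (PySem.List.pyRange 0 (PySem.Str.len s) 2).map (fun i => PySem.Str.slice s (some i) (some (i + 2)))
    = (List.range (Mf s)).map (fun t : Nat => chunkf s (2 * (t : Int))) := by
  have hn0 := len_nonneg s
  rw [PySem.List.pyRange_of_pos 0 (PySem.Str.len s) (by norm_num), List.map_map]
  have hM' : (if 0 < PySem.Str.len s then ((PySem.Str.len s - 0 + 2 - 1) / 2).toNat else 0) = Mf s := by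
    unfold Mf; split_ifs with h <;> omega
  rw [hM']
  apply List.map_congr_left
  intro k _
  simp only [Function.comp, chunkf, zero_add]

theorem bucket_eq (s : String) (b : Int) (hb0 : 0 ≤ b) (hb32 : b < 32) :
    ((List.range (Mf s)).filter (fun k : Nat => ((k : Int) % 32 == b))).map
      (fun k : Nat => chunkf s (2 * (k : Int)))
    = (PySem.List.pyRange (2 * b) (PySem.Str.len s) 64).map
        (fun i => PySem.Str.slice s (some i) (some (i + 2))) := by
  have hn0 := len_nonneg s
  rw [range_filter_mod (Mf s) b hb0 hb32, List.map_map]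
  rw [PySem.List.pyRange_of_pos (2 * b) (PySem.Str.len s) (by norm_num : (0:Int) < 64), List.map_map]
  have hK : (if 2 * b < PySem.Str.len s then ((PySem.Str.len s - 2 * b + 64 - 1) / 64).toNat else 0)
      = cnt (Mf s) b := by
    unfold cnt Mf; split_ifs with h <;> omega
  rw [hK]
  apply List.map_congr_left
  intro t _
  simp only [Function.comp, chunkf]
  congr 2 <;> omega

theorem foldl_pair (CL : List String) (D0 : PySem.Dict Int (List String)) (L : List Int) :
    L.foldl (fun d index =>
        d.modify (PySem.Int.mod index 32) []
          (fun lst => lst ++ [PySem.List.pyGetD CL index ""])) D0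
    = (L.map (fun index => (PySem.Int.mod index 32, PySem.List.pyGetD CL index ""))).foldl
        (fun d p => d.modify p.1 [] (fun x => x ++ [p.2])) D0 := by
  rw [List.foldl_map]

theorem prepare_result_eq (cipher_mess : String) :
    prepare_result cipher_mess = prepare_result_alt cipher_mess := by
  unfold prepare_result prepare_result_alt
  dsimp only
  rw [cl_eq cipher_mess]
  have hlen : ((List.range (Mf cipher_mess)).map (fun t : Nat => chunkf cipher_mess (2 * (t : Int)))).length
      = Mf cipher_mess := by simp
  rw [hlen]
  rw [foldl_pair]
  have hP : (PySem.List.pyRange 0 ((Mf cipher_mess : Nat) : Int) 1).map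
        (fun index => (PySem.Int.mod index 32, PySem.List.pyGetD
          ((List.range (Mf cipher_mess)).map (fun t : Nat => chunkf cipher_mess (2 * (t : Int)))) index ""))
      = (List.range (Mf cipher_mess)).map (fun k : Nat => (((k : Int)) % 32, chunkf cipher_mess (2 * (k : Int)))) := by
    rw [PySem.List.pyRange_one, List.map_map]
    have h0 : (((Mf cipher_mess : Nat) : Int) - 0).toNat = Mf cipher_mess := by omega
    rw [h0]
    apply List.map_congr_left
    intro k hk
    have hkM : k < Mf cipher_mess := List.mem_range.mp hk
    simp only [Function.comp, zero_add]
    refine Prod.ext ?_ ?_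
    · show PySem.Int.mod (k : Int) 32 = (k : Int) % 32
      simp [PySem.Int.mod, Int.fmod_eq_emod]
    · show PySem.List.pyGetD _ (k : Int) "" = chunkf cipher_mess (2 * (k : Int))
      rw [PySem.List.pyGetD_natCast, PySem.List.getD_map_range _ _ _ _ hkM]
  rw [hP, scatter_items _ (by
    intro p hp
    obtain ⟨k, _, rfl⟩ := List.mem_map.mp hp
    exact ⟨Int.emod_nonneg _ (by norm_num), Int.emod_lt_of_pos _ (by norm_num)⟩)]
  apply List.map_congr_left
  intro b hb
  obtain ⟨hb0, hb32⟩ := PySem.List.mem_pyRange_one.mp hb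
  refine Prod.ext rfl ?_
  rw [List.filter_map, List.map_map]
  have hpred : ((fun (p : Int × String) => p.1 == b) ∘
        fun k : Nat => (((k : Int)) % 32, chunkf cipher_mess (2 * (k : Int))))
      = fun k : Nat => ((k : Int) % 32 == b) := rfl
  rw [hpred]
  have hcomp : ((fun (p : Int × String) => p.2) ∘
        fun k : Nat => (((k : Int)) % 32, chunkf cipher_mess (2 * (k : Int))))
      = fun k : Nat => chunkf cipher_mess (2 * (k : Int)) := rfl
  rw [hcomp]
  exact bucket_eq cipher_mess b hb0 hb32

-- ===== VERDICT (by name: the statement is the Claim_ definition above) =====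
theorem prepare_result_spec : Claim_equal_prepare_result := by
  intro s _
  unfold Spec_prepare_result
  exact prepare_result_eq s
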